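-- pv_equiv track=rewrite | github.com/vans-aj/SwiftCache | backend/app.py | get_job_priority
-- ===== SOURCE A (Python) =====
-- def get_job_priority(url: str) -> int:
--     """Assign priority for SJF: lower number = higher priority (shorter)."""
--     small_exts = ['.css', '.js', '.html', '.json']
--     medium_exts = ['.jpg', '.png', '.gif', '.svg']
--     large_exts = ['.mp4', '.zip', '.iso', '.pdf']
--
--     for ext in small_exts:
--         if url.endswith(ext):
--             return 1
--     for ext in medium_exts:
--         if url.endswith(ext):
--             return 2
--     for ext in large_exts:
--         if url.endswith(ext):
--             return 3
--     return 2
-- ===== SOURCE B (Python) =====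
-- _PRIORITY = {
--     '.css': 1, '.js': 1, '.html': 1, '.json': 1,
--     '.jpg': 2, '.png': 2, '.gif': 2, '.svg': 2,
--     '.mp4': 3, '.zip': 3, '.iso': 3, '.pdf': 3,
-- }
--
--
-- def get_job_priority(url: str) -> int:
--     """Assign priority for SJF: lower number = higher priority (shorter)."""
--     parts = url.rsplit('.', 1)
--     if len(parts) == 1:
--         return 2
--     return _PRIORITY.get('.' + parts[1], 2)
-- ===== Notes on version B (the rewrite author's own statement) =====
-- stated objective: idiomatic
-- what changed: Replaces the three sequential endswith-scanning loops by extracting the trailing extension once with rsplit('.', 1) and doing a single lookup in a precomputed extension-to-priority dict (default 2).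
import Mathlib
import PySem

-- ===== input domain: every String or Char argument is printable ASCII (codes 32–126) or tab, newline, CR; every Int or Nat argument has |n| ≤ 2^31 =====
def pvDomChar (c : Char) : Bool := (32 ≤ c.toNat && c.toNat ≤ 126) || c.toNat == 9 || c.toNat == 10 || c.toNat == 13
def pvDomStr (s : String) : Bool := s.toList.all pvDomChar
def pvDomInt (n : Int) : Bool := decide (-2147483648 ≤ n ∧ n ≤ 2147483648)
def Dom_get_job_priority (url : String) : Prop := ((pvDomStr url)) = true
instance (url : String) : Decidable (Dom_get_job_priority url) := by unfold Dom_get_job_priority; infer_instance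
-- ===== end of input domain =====

-- B replaces A's three endswith-scanning loops by one rsplit-based extension extraction and a single dict lookup (idiomatic; same cost).

-- ===== PORT A =====
-- each 'for ext in …: if url.endswith(ext): return k' loop returns k iff some ext in the list matches
def get_job_priority (url : String) : Int :=
  if ([".css", ".js", ".html", ".json"].any (fun e => PySem.Str.endswith url e)) then 1
  else if ([".jpg", ".png", ".gif", ".svg"].any (fun e => PySem.Str.endswith url e)) then 2
  else if ([".mp4", ".zip", ".iso", ".pdf"].any (fun e => PySem.Str.endswith url e)) then 3
  else 2

-- ===== PORT B =====
-- hand port of the part of url.rsplit with a dot separator that Source B uses: the segment after the LAST dot,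
-- found by scanning the reversed character list; none = url contains no dot (Python's len(parts) == 1). Exact.
def pvLastSeg : List Char → List Char → Option (List Char)
  | [], _ => none
  | c :: rest, acc => if c = '.' then some acc else pvLastSeg rest (c :: acc)

def pvPriorityMap : PySem.Dict String Int :=
  PySem.Dict.ofList
    [(".css",1),(".js",1),(".html",1),(".json",1),
     (".jpg",2),(".png",2),(".gif",2),(".svg",2),
     (".mp4",3),(".zip",3),(".iso",3),(".pdf",3)]

def get_job_priority_alt (url : String) : Int :=
  match pvLastSeg url.toList.reverse [] with
  | none => 2
  | some seg => PySem.Dict.getD pvPriorityMap (String.ofList ('.' :: seg)) 2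

-- ===== PRECONDITION & SPEC =====
def Spec_get_job_priority (url : String) (out : Int) : Prop := out = get_job_priority_alt url
instance (url : String) (out : Int) : Decidable (Spec_get_job_priority url out) := by unfold Spec_get_job_priority; infer_instance

-- ===== CLAIM (what is proved, stated in full; the proofs are below) =====
def Claim_equal_get_job_priority : Prop := ∀ (url : String), Dom_get_job_priority url → Spec_get_job_priority url (get_job_priority url)

-- ===== LEMMAS AND PROOFS =====

theorem pvLastSeg_some_iff (r acc out : List Char) :
    pvLastSeg r acc = some out ↔ ∃ p q, r = p ++ '.' :: q ∧ '.' ∉ p ∧ out = p.reverse ++ acc := by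
  induction r generalizing acc with
  | nil =>
    constructor
    · intro h; simp [pvLastSeg] at h
    · rintro ⟨p, q, h, -, -⟩; cases p <;> simp at h
  | cons c rest ih =>
    by_cases hc : c = '.'
    · subst hc
      simp only [pvLastSeg, reduceIte]
      constructor
      · intro h
        exact ⟨[], rest, by simp, by simp, by simpa using (Option.some.injEq _ _ ▸ h).symm⟩
      · rintro ⟨p, q, h, hp, ho⟩
        cases p with
        | nil =>
          simp only [List.nil_append, List.cons.injEq] at h
          simp [ho]
        | cons x p' =>
          simp only [List.cons_append, List.cons.injEq] at h
          exact absurd (h.1 ▸ List.mem_cons_self) hp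
    · simp only [pvLastSeg, if_neg hc]
      rw [ih]
      constructor
      · rintro ⟨p, q, h, hp, ho⟩
        refine ⟨c :: p, q, by simp [h], ?_, by simpa using ho⟩
        simp only [List.mem_cons, not_or]
        exact ⟨fun he => hc he.symm, hp⟩
      · rintro ⟨p, q, h, hp, ho⟩
        cases p with
        | nil =>
          simp only [List.nil_append, List.cons.injEq] at h
          exact absurd h.1 hc
        | cons x p' =>
          simp only [List.cons_append, List.cons.injEq] at h
          refine ⟨p', q, h.2, fun hm => hp (List.mem_cons_of_mem _ hm), ?_⟩
          simp [ho, h.1]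

theorem pv_ends_iff_seg (url : String) (e : List Char) (he : '.' ∉ e) :
    PySem.Chars.endswith url.toList ('.' :: e) = decide (some e = pvLastSeg url.toList.reverse []) := by
  rw [Bool.eq_iff_iff]
  simp only [decide_eq_true_eq, eq_comm (a := some e)]
  rw [PySem.Chars.endswith_iff, pvLastSeg_some_iff]
  constructor
  · rintro ⟨t, ht⟩
    refine ⟨e.reverse, t.reverse, ?_, by simpa using he, by simp⟩
    rw [← ht]; simp
  · rintro ⟨p, q, h, hp, ho⟩
    simp only [List.append_nil] at ho
    refine ⟨q.reverse, ?_⟩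
    have hu : url.toList = (p ++ '.' :: q).reverse := by
      rw [← h]; simp
    rw [hu, ho]; simp

theorem pv_key_eq (a b : List Char) : (String.ofList a == String.ofList b) = decide (a = b) := by
  rcases Decidable.em (a = b) with h | h <;> simp [h, String.ext_iff]

-- lookup in the literal priority dict, as a chain of segment comparisons
theorem pv_getD_map (seg : List Char) :
    PySem.Dict.getD pvPriorityMap (String.ofList ('.' :: seg)) 2 =
      if ['c','s','s'] = seg then 1 else if ['j','s'] = seg then 1
      else if ['h','t','m','l'] = seg then 1 else if ['j','s','o','n'] = seg then 1
      else if ['j','p','g'] = seg then 2 else if ['p','n','g'] = seg then 2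
      else if ['g','i','f'] = seg then 2 else if ['s','v','g'] = seg then 2
      else if ['m','p','4'] = seg then 3 else if ['z','i','p'] = seg then 3
      else if ['i','s','o'] = seg then 3 else if ['p','d','f'] = seg then 3
      else 2 := by
  have hmap : pvPriorityMap =
      PySem.Dict.mk
        [(".css",1),(".js",1),(".html",1),(".json",1),
         (".jpg",2),(".png",2),(".gif",2),(".svg",2),
         (".mp4",3),(".zip",3),(".iso",3),(".pdf",3)] := by rfl
  rw [hmap, PySem.Dict.getD]
  simp only [PySem.Dict.get?_mk_cons,
    show (".css" : String) = String.ofList ['.','c','s','s'] from rfl,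
    show (".js" : String) = String.ofList ['.','j','s'] from rfl,
    show (".html" : String) = String.ofList ['.','h','t','m','l'] from rfl,
    show (".json" : String) = String.ofList ['.','j','s','o','n'] from rfl,
    show (".jpg" : String) = String.ofList ['.','j','p','g'] from rfl,
    show (".png" : String) = String.ofList ['.','p','n','g'] from rfl,
    show (".gif" : String) = String.ofList ['.','g','i','f'] from rfl,
    show (".svg" : String) = String.ofList ['.','s','v','g'] from rfl,
    show (".mp4" : String) = String.ofList ['.','m','p','4'] from rfl,
    show (".zip" : String) = String.ofList ['.','z','i','p'] from rfl,
    show (".iso" : String) = String.ofList ['.','i','s','o'] from rfl,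
    show (".pdf" : String) = String.ofList ['.','p','d','f'] from rfl,
    pv_key_eq, List.cons.injEq, true_and, decide_eq_true_eq]
  by_cases h0 : ['c','s','s'] = seg
  · simp only [if_pos h0]; rfl
  simp only [if_neg h0]
  by_cases h1 : ['j','s'] = seg
  · simp only [if_pos h1]; rfl
  simp only [if_neg h1]
  by_cases h2 : ['h','t','m','l'] = seg
  · simp only [if_pos h2]; rfl
  simp only [if_neg h2]
  by_cases h3 : ['j','s','o','n'] = seg
  · simp only [if_pos h3]; rfl
  simp only [if_neg h3]
  by_cases h4 : ['j','p','g'] = seg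
  · simp only [if_pos h4]; rfl
  simp only [if_neg h4]
  by_cases h5 : ['p','n','g'] = seg
  · simp only [if_pos h5]; rfl
  simp only [if_neg h5]
  by_cases h6 : ['g','i','f'] = seg
  · simp only [if_pos h6]; rfl
  simp only [if_neg h6]
  by_cases h7 : ['s','v','g'] = seg
  · simp only [if_pos h7]; rfl
  simp only [if_neg h7]
  by_cases h8 : ['m','p','4'] = seg
  · simp only [if_pos h8]; rfl
  simp only [if_neg h8]
  by_cases h9 : ['z','i','p'] = seg
  · simp only [if_pos h9]; rfl
  simp only [if_neg h9]
  by_cases h10 : ['i','s','o'] = seg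
  · simp only [if_pos h10]; rfl
  simp only [if_neg h10]
  by_cases h11 : ['p','d','f'] = seg
  · simp only [if_pos h11]; rfl
  simp only [if_neg h11]
  rfl

theorem pv_chain (c1 c2 c3 c4 c5 c6 c7 c8 c9 c10 c11 c12 : Prop)
    [Decidable c1] [Decidable c2] [Decidable c3] [Decidable c4] [Decidable c5] [Decidable c6]
    [Decidable c7] [Decidable c8] [Decidable c9] [Decidable c10] [Decidable c11] [Decidable c12] :
    (if c1 ∨ c2 ∨ c3 ∨ c4 then (1 : Int) else if c5 ∨ c6 ∨ c7 ∨ c8 then 2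
      else if c9 ∨ c10 ∨ c11 ∨ c12 then 3 else 2) =
    (if c1 then 1 else if c2 then 1 else if c3 then 1 else if c4 then 1
      else if c5 then 2 else if c6 then 2 else if c7 then 2 else if c8 then 2
      else if c9 then 3 else if c10 then 3 else if c11 then 3 else if c12 then 3 else 2) := by
  by_cases h1 : c1
  · simp [h1]
  simp [h1]
  by_cases h2 : c2
  · simp [h2]
  simp [h2]
  by_cases h3 : c3
  · simp [h3]
  simp [h3]
  by_cases h4 : c4
  · simp [h4]
  simp [h4]
  by_cases h5 : c5
  · simp [h5]
  simp [h5]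
  by_cases h6 : c6
  · simp [h6]
  simp [h6]
  by_cases h7 : c7
  · simp [h7]
  simp [h7]
  by_cases h8 : c8
  · simp [h8]
  simp [h8]
  by_cases h9 : c9
  · simp [h9]
  simp [h9]
  by_cases h10 : c10
  · simp [h10]
  simp [h10]
  by_cases h11 : c11
  · simp [h11]
  simp [h11]

-- ===== VERDICT (by name: the statement is the Claim_ definition above) =====
theorem get_job_priority_spec : Claim_equal_get_job_priority := by
  intro url _
  unfold Spec_get_job_priority get_job_priority get_job_priority_alt
  simp only [List.any_cons, List.any_nil, PySem.Str.endswith_eq,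
    show (".css" : String).toList = '.' :: ['c','s','s'] from rfl,
    show (".js" : String).toList = '.' :: ['j','s'] from rfl,
    show (".html" : String).toList = '.' :: ['h','t','m','l'] from rfl,
    show (".json" : String).toList = '.' :: ['j','s','o','n'] from rfl,
    show (".jpg" : String).toList = '.' :: ['j','p','g'] from rfl,
    show (".png" : String).toList = '.' :: ['p','n','g'] from rfl,
    show (".gif" : String).toList = '.' :: ['g','i','f'] from rfl,
    show (".svg" : String).toList = '.' :: ['s','v','g'] from rfl,
    show (".mp4" : String).toList = '.' :: ['m','p','4'] from rfl,
    show (".zip" : String).toList = '.' :: ['z','i','p'] from rfl,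
    show (".iso" : String).toList = '.' :: ['i','s','o'] from rfl,
    show (".pdf" : String).toList = '.' :: ['p','d','f'] from rfl]
  rw [pv_ends_iff_seg url ['c','s','s'] (by decide),
      pv_ends_iff_seg url ['j','s'] (by decide),
      pv_ends_iff_seg url ['h','t','m','l'] (by decide),
      pv_ends_iff_seg url ['j','s','o','n'] (by decide),
      pv_ends_iff_seg url ['j','p','g'] (by decide),
      pv_ends_iff_seg url ['p','n','g'] (by decide),
      pv_ends_iff_seg url ['g','i','f'] (by decide),
      pv_ends_iff_seg url ['s','v','g'] (by decide),
      pv_ends_iff_seg url ['m','p','4'] (by decide),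
      pv_ends_iff_seg url ['z','i','p'] (by decide),
      pv_ends_iff_seg url ['i','s','o'] (by decide),
      pv_ends_iff_seg url ['p','d','f'] (by decide)]
  cases hgo : pvLastSeg url.toList.reverse [] with
  | none => simp
  | some seg =>
    simp only [Option.some.injEq, pv_getD_map, Bool.or_eq_true, decide_eq_true_eq,
      Bool.false_eq_true, or_false]
    rw [pv_chain]
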